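-- pv_equiv track=rewrite | github.com/cyy88/ApiFramework | common/test_data_manager.py | create_parametrized_data
-- ===== SOURCE A (Python) =====
-- from typing import Any, Dict, List, Optional, Union, Generator
--
-- def create_parametrized_data(base_data: Dict[str, Any], variations: Dict[str, List[Any]]) -> List[Dict[str, Any]]:
--     """
--     创建参数化测试数据
--
--     Args:
--         base_data: 基础数据
--         variations: 变化参数
--
--     Returns:
--         参数化数据列表
--     """
--     import itertools
--
--     # 获取所有变化组合
--     keys = list(variations.keys())
--     values = list(variations.values())
--     combinations = list(itertools.product(*values))
--
--     result = []
--     for combination in combinations: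
--         data = base_data.copy()
--         for i, key in enumerate(keys):
--             data[key] = combination[i]
--         result.append(data)
--
--     return result
-- ===== SOURCE B (Python) =====
-- def create_parametrized_data(base_data, variations):
--     """Fold over the variation keys, expanding a frontier of dicts; no itertools."""
--     result = [base_data.copy()]
--     for key, vals in variations.items():
--         new_result = []
--         for d in result:
--             for v in vals:
--                 nd = d.copy()
--                 nd[key] = v
--                 new_result.append(nd)
--         result = new_result
--     return result
-- ===== Notes on version B (the rewrite author's own statement) =====
-- stated objective: simpler
-- what changed: Replaced itertools.product over the collected value lists (then re-applying keys by index onto a fresh base copy per combination) with a single fold over variations.items() that rebuilds a frontier of dicts, extending each dict with each value of the current key.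
import Mathlib
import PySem

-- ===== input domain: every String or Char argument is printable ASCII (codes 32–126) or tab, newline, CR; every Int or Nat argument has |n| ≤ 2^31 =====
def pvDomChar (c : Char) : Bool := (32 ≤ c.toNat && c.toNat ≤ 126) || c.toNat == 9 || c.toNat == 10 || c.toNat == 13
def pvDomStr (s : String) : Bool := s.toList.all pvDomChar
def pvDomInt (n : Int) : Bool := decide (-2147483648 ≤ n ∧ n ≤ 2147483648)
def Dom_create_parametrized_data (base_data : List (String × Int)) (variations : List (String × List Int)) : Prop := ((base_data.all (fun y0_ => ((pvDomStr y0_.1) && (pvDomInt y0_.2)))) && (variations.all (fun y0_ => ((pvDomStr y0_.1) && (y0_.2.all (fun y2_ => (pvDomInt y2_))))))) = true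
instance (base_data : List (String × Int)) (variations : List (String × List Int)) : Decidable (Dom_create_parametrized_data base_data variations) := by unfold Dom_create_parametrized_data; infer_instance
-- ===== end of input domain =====

-- B replaces itertools.product + per-combination key re-application by a single fold over the
-- variation items that expands a frontier of dicts; same results, no index bookkeeping.

-- ===== PORT A =====
-- itertools.product(*values), first iterable varies slowest
def pyProd : List (List Int) → List (List Int)
  | [] => [[]]
  | vs :: rest => vs.flatMap (fun v => (pyProd rest).map (fun c => v :: c))

def create_parametrized_data (base_data : List (String × Int)) (variations : List (String × List Int)) : List (List (String × Int)) :=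
  let V := PySem.Dict.ofList variations
  let keys := V.keys
  let values := V.values
  let combinations := pyProd values
  let base := PySem.Dict.ofList base_data
  -- 'for i, key in enumerate(keys): data[key] = combination[i]' — keys.zip combination walks the
  -- same (key, combination[i]) pairs, since every combination has length keys.length
  (combinations.map (fun combination =>
    (keys.zip combination).foldl (fun d p => d.insert p.1 p.2) base)).map (·.items)

-- ===== PORT B =====
def create_parametrized_data_alt (base_data : List (String × Int)) (variations : List (String × List Int)) : List (List (String × Int)) :=
  let V := PySem.Dict.ofList variations
  let base := PySem.Dict.ofList base_data
  ((V.items).foldl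
    (fun result p => result.flatMap (fun d => p.2.map (fun v => d.insert p.1 v)))
    [base]).map (·.items)

-- ===== PRECONDITION & SPEC =====
def Spec_create_parametrized_data (base_data : List (String × Int)) (variations : List (String × List Int)) (out : List (List (String × Int))) : Prop := out = create_parametrized_data_alt base_data variations
instance (base_data : List (String × Int)) (variations : List (String × List Int)) (out : List (List (String × Int))) : Decidable (Spec_create_parametrized_data base_data variations out) := by unfold Spec_create_parametrized_data; infer_instance

-- ===== CLAIM (what is proved, stated in full; the proofs are below) =====
def Claim_equal_create_parametrized_data : Prop := ∀ (base_data : List (String × Int)) (variations : List (String × List Int)), Dom_create_parametrized_data base_data variations → Spec_create_parametrized_data base_data variations (create_parametrized_data base_data variations)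

-- ===== LEMMAS AND PROOFS =====

-- B's frontier step, abbreviated for the lemmas
def pvStep (result : List (PySem.Dict String Int)) (p : String × List Int) : List (PySem.Dict String Int) :=
  result.flatMap (fun d => p.2.map (fun v => d.insert p.1 v))

-- B's fold distributes over the frontier: each seed dict evolves independently
theorem pvFoldFlat (L : List (String × List Int)) (xs : List (PySem.Dict String Int)) :
    L.foldl pvStep xs = xs.flatMap (fun d => L.foldl pvStep [d]) := by
  induction L generalizing xs with
  | nil => simp
  | cons p rest ih =>
    simp only [List.foldl_cons]
    rw [ih (pvStep xs p)]
    have hstep : pvStep xs p = xs.flatMap (fun d => pvStep [d] p) := by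
      simp [pvStep]
    rw [hstep, List.flatMap_assoc]
    congr 1
    funext d
    rw [ih (pvStep [d] p)]

-- main invariant: A's product-then-apply equals B's frontier fold, from any start dict
theorem pvCoreEq (L : List (String × List Int)) (d0 : PySem.Dict String Int) :
    (pyProd (L.map (·.2))).map
        (fun c => ((L.map (·.1)).zip c).foldl (fun d p => d.insert p.1 p.2) d0)
      = L.foldl pvStep [d0] := by
  induction L generalizing d0 with
  | nil => simp [pyProd]
  | cons p rest ih =>
    simp only [List.map_cons, pyProd, List.foldl_cons, List.map_flatMap, List.map_map]
    have hrhs : pvStep [d0] p = p.2.map (fun v => d0.insert p.1 v) := by simp [pvStep]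
    rw [hrhs, pvFoldFlat, List.flatMap_map]
    congr 1
    funext v
    simpa [Function.comp] using ih (d0.insert p.1 v)

-- ===== VERDICT (by name: the statement is the Claim_ definition above) =====
theorem create_parametrized_data_spec : Claim_equal_create_parametrized_data := by
  intro base_data variations _
  unfold Spec_create_parametrized_data create_parametrized_data create_parametrized_data_alt
  simp only [PySem.Dict.keys, PySem.Dict.values]
  exact congrArg (List.map _)
    (pvCoreEq (PySem.Dict.ofList variations).items (PySem.Dict.ofList base_data))
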